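-- pv_equiv track=rewrite | github.com/BioComputingUP/af2_af3_idr_analysis | src/parse_fasta.py | segment_label_regions
-- ===== SOURCE A (Python) =====
-- def segment_label_regions(label_string, target='1'):
--     """
--     Segments the label string into regions of the target label (default is '1').
--     """
--     regions = []
--     in_region = False
--     start = 1
--
--     for i, char in enumerate(label_string,start=1):
--         if char == target:
--             if not in_region:
--                 in_region = True
--                 start = i
--         else:
--             if in_region:
--                 regions.append((start, i - 1))
--                 in_region = False
--
--     if in_region:
--         regions.append((start, len(label_string)))
--
--     return regions
-- ===== SOURCE B (Python) =====
-- def segment_label_regions(label_string, target='1'):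
--     """
--     Segments the label string into regions of the target label (default is '1').
--     Run-based: first compute maximal runs of equal key (char == target) with
--     their lengths, then emit one (start, end) pair per True run.
--     """
--     n = len(label_string)
--     runs = []
--     i = 0
--     while i < n:
--         j = i + 1
--         while j < n and (label_string[j] == target) == (label_string[i] == target):
--             j += 1
--         runs.append((label_string[i] == target, j - i))
--         i = j
--     regions = []
--     idx = 1
--     for key, length in runs:
--         if key:
--             regions.append((idx, idx + length - 1))
--         idx += length
--     return regions
-- ===== Notes on version B (the rewrite author's own statement) =====
-- stated objective: alternative
-- what changed: Replaces A's per-character in_region/start state machine with a two-phase run-length decomposition: first group the string into maximal runs of equal key (char == target) with a two-pointer scan, then emit one (start, end) pair per matching run from the run lengths.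
import Mathlib
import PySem

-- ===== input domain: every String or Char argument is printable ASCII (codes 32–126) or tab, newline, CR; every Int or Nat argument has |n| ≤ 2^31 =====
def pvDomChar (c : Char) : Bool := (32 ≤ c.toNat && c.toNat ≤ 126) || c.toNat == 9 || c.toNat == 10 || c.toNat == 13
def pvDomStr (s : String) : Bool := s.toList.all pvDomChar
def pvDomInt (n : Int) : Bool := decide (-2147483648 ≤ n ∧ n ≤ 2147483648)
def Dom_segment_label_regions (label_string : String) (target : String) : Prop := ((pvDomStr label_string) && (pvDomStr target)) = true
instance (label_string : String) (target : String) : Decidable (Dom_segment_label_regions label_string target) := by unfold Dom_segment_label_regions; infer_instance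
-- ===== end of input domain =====

-- B replaces A's per-character in_region/start state machine by a two-phase run-length
-- decomposition (maximal runs of equal key, then one region per matching run); same cost.

-- ===== PORT A =====
-- A's for-loop: state (regions, in_region, start), 1-based counter i.
def segLoopA (target : String) : List Char → Int → List (Int × Int) → Bool → Int → List (Int × Int) × Bool × Int
  | [], _, regions, in_region, start => (regions, in_region, start)
  | c :: cs, i, regions, in_region, start =>
    if String.mk [c] == target then
      if !in_region then segLoopA target cs (i + 1) regions true i
      else segLoopA target cs (i + 1) regions true start
    else
      if in_region then segLoopA target cs (i + 1) (regions ++ [(start, i - 1)]) false start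
      else segLoopA target cs (i + 1) regions false start

def segment_label_regions (label_string : String) (target : String) : List (Int × Int) :=
  let t := segLoopA target label_string.toList 1 [] false 1
  if t.2.1 then t.1 ++ [(t.2.2, PySem.Str.len label_string)] else t.1

-- ===== PORT B =====
-- B phase 1: maximal runs of equal key (char == target), as (key, run length).
def segRuns (f : Char → Bool) : List Char → List (Bool × Nat)
  | [] => []
  | c :: cs =>
    (f c, (cs.takeWhile (fun c' => f c' == f c)).length + 1)
      :: segRuns f (cs.dropWhile (fun c' => f c' == f c))
termination_by l => l.length
decreasing_by simpa using Nat.lt_succ_of_le (List.length_dropWhile_le _ _)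

-- B phase 2: emit one (start, end) pair per True run, advancing idx by the run length.
def segEmit : List (Bool × Nat) → Int → List (Int × Int) → List (Int × Int)
  | [], _, regions => regions
  | (k, n) :: t, idx, regions =>
    segEmit t (idx + (n : Int)) (if k then regions ++ [(idx, idx + (n : Int) - 1)] else regions)

def segment_label_regions_alt (label_string : String) (target : String) : List (Int × Int) :=
  segEmit (segRuns (fun c => String.mk [c] == target) label_string.toList) 1 []

-- ===== PRECONDITION & SPEC =====
def Spec_segment_label_regions (label_string : String) (target : String) (out : List (Int × Int)) : Prop := out = segment_label_regions_alt label_string target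
instance (label_string : String) (target : String) (out : List (Int × Int)) : Decidable (Spec_segment_label_regions label_string target out) := by unfold Spec_segment_label_regions; infer_instance

-- ===== CLAIM =====
def Claim_equal_segment_label_regions : Prop := ∀ (label_string : String) (target : String), Dom_segment_label_regions label_string target → Spec_segment_label_regions label_string target (segment_label_regions label_string target)

-- ===== LEMMAS AND PROOFS =====
-- A's trailing 'if in_region: append (start, last)' step, as a function of the loop's result.
def segFin (t : List (Int × Int) × Bool × Int) (last : Int) : List (Int × Int) :=
  if t.2.1 then t.1 ++ [(t.2.2, last)] else t.1

theorem segEmit_acc (t : List (Bool × Nat)) : ∀ (i : Int) (acc : List (Int × Int)),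
    segEmit t i acc = acc ++ segEmit t i [] := by
  induction t with
  | nil => intro i acc; simp [segEmit]
  | cons p t ih =>
    intro i acc
    obtain ⟨k, n⟩ := p
    cases k
    · rw [segEmit, segEmit, if_neg (by simp), if_neg (by simp)]
      exact ih (i + n) acc
    · rw [segEmit, segEmit, if_pos rfl, if_pos rfl]
      rw [ih (i + n) (acc ++ [(i, i + n - 1)]), ih (i + n) ([] ++ [(i, i + n - 1)])]
      simp [List.append_assoc]

theorem segEmit_false_cons (f : Char → Bool) (c : Char) (hc : f c = false) :
    ∀ (cs : List Char) (i : Int) (acc : List (Int × Int)),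
    segEmit (segRuns f (c :: cs)) i acc = segEmit (segRuns f cs) (i + 1) acc := by
  intro cs i acc
  cases cs with
  | nil => simp [segRuns, segEmit, hc]
  | cons c' cs' =>
    by_cases hc' : f c' = true
    · simp [segRuns, segEmit, hc, hc']
    · simp only [Bool.not_eq_true] at hc'
      rw [segRuns, segRuns]
      simp only [hc, hc', List.takeWhile_cons, List.dropWhile_cons, beq_self_eq_true, if_true,
        List.length_cons, segEmit]
      congr 1
      push_cast; ring

theorem segLoop_runs (target : String) (cs : List Char) : ∀ (i : Int) (r : List (Int × Int)) (s : Int),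
    (segFin (segLoopA target cs i r false s) (i + (cs.length : Int) - 1)
      = r ++ segEmit (segRuns (fun c => String.mk [c] == target) cs) i [])
    ∧ (segFin (segLoopA target cs i r true s) (i + (cs.length : Int) - 1)
      = r ++ [(s, i + ((cs.takeWhile (fun c => (String.mk [c] == target) == true)).length : Int) - 1)]
        ++ segEmit (segRuns (fun c => String.mk [c] == target)
              (cs.dropWhile (fun c => (String.mk [c] == target) == true)))
            (i + ((cs.takeWhile (fun c => (String.mk [c] == target) == true)).length : Int)) []) := by
  induction cs with
  | nil => intro i r s; simp [segLoopA, segFin, segRuns, segEmit]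
  | cons c cs ih =>
    intro i r s
    have hlen : i + (((c :: cs).length : Nat) : Int) - 1 = (i + 1) + ((cs.length : Nat) : Int) - 1 := by
      simp only [List.length_cons]; push_cast; ring
    have h2 : (i + 1) + ((cs.takeWhile (fun c' => (String.mk [c'] == target) == true)).length : Int) - 1
        = i + (((cs.takeWhile (fun c' => (String.mk [c'] == target) == true)).length + 1 : Nat) : Int) - 1 := by
      push_cast; ring
    have h3 : (i + 1) + ((cs.takeWhile (fun c' => (String.mk [c'] == target) == true)).length : Int)
        = i + (((cs.takeWhile (fun c' => (String.mk [c'] == target) == true)).length + 1 : Nat) : Int) := by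
      push_cast; ring
    by_cases hc : (String.mk [c] == target) = true
    · constructor
      · rw [segLoopA]
        simp only [hc, Bool.not_false, if_true]
        rw [hlen, (ih (i + 1) r i).2]
        rw [segRuns]
        simp only [hc]
        rw [segEmit, if_pos rfl]
        rw [h2, h3, List.nil_append]
        conv_rhs => rw [segEmit_acc]
        simp [List.append_assoc]
      · rw [segLoopA]
        simp only [hc, Bool.not_true, Bool.false_eq_true, if_true, if_false]
        rw [hlen, (ih (i + 1) r s).2]
        simp only [List.takeWhile_cons, List.dropWhile_cons, hc, beq_self_eq_true, if_true,
          List.length_cons]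
        rw [h2, h3]
    · have hc' : (String.mk [c] == target) = false := by simpa using hc
      constructor
      · rw [segLoopA]
        simp only [hc', Bool.false_eq_true, if_false]
        rw [hlen, (ih (i + 1) r s).1, segEmit_false_cons _ c hc' cs i []]
      · rw [segLoopA]
        simp only [hc', Bool.false_eq_true, if_false, if_true]
        rw [hlen, (ih (i + 1) (r ++ [(s, i - 1)]) s).1]
        simp only [List.takeWhile_cons, List.dropWhile_cons, hc', Bool.false_eq_true, beq_iff_eq,
          if_false, List.length_nil, Int.natCast_zero, add_zero]
        rw [segEmit_false_cons _ c hc' cs i []]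

-- ===== VERDICT =====
theorem segment_label_regions_spec : Claim_equal_segment_label_regions := by
  intro ls target _
  unfold Spec_segment_label_regions segment_label_regions segment_label_regions_alt
  have h := (segLoop_runs target ls.toList 1 [] 1).1
  have hlen : PySem.Str.len ls = 1 + (ls.toList.length : Int) - 1 := by
    rw [PySem.Str.len_eq]; ring
  rw [hlen]
  simpa [segFin] using h
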